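-- pv_equiv track=rewrite | github.com/fanghaoZZ/bianyiyuanli | bianyiyuanli3/main.py | convert
-- ===== SOURCE A (Python) =====
-- import copy
--
-- def convert(ch_i, ch_j, grammer):
--     rules = copy.deepcopy(grammer)
--     for key in grammer.keys():
--         for item_i in grammer[key]:
--             if ch_i == key and ch_j == item_i[0]:
--                 rules[key].remove(item_i)
--                 for item_j in grammer[ch_j]:
--                     rules[key].append(item_j + item_i[1:])
--     return rules
-- ===== SOURCE B (Python) =====
-- import copy
--
-- def convert(ch_i, ch_j, grammer):
--     rules = copy.deepcopy(grammer)
--     if ch_i in grammer: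
--         kept = []
--         appended = []
--         for item_i in rules[ch_i]:
--             if ch_j == item_i[0]:
--                 appended.extend(item_j + item_i[1:] for item_j in grammer[ch_j])
--             else:
--                 kept.append(item_i)
--         rules[ch_i] = kept + appended
--     return rules
-- ===== Notes on version B (the rewrite author's own statement) =====
-- stated objective: simpler
-- what changed: A scans every grammar key and, per matched production, mutates the rule list in place with remove-then-append; B guards once on ch_i being a key and makes a single pass over its productions, collecting kept productions and all replacements and writing kept+appended back in one assignment.
import Mathlib
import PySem

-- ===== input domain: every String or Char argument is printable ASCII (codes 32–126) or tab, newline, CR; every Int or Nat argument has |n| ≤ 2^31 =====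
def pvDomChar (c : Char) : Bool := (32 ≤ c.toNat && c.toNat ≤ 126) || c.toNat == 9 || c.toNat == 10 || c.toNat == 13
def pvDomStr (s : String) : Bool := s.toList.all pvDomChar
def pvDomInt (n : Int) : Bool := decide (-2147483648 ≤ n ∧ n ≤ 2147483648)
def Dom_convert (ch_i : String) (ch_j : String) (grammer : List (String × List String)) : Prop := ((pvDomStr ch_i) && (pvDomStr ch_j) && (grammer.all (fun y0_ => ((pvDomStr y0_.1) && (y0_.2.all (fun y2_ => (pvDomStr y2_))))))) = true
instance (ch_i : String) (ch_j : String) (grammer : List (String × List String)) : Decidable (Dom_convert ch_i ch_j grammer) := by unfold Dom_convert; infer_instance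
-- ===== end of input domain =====

-- B replaces A's scan over every grammar key by a single guarded pass over the ch_i entry
-- (kept productions first, then all replacements appended), same return value; objective: simpler.


-- shared primitive helpers (exact ports of Python expressions both sources contain)
-- Python 'a + b' on str: concatenation of code points
def pyStrAdd (a b : String) : String := String.ofList (a.toList ++ b.toList)
-- Python 'ch_j == item_i[0]' AFTER the IndexError case (empty item) is ruled out by Pre_;
-- on an empty item it is False here where Python raises.
def headMatch (ch_j item : String) : Bool :=
  match PySem.Str.pyGet? item 0 with
  | some c => ch_j == String.ofList [c]
  | none => false
-- Python 'item_j + item_i[1:]'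
def replOne (item_j item_i : String) : String := pyStrAdd item_j (PySem.Str.slice item_i (some 1) none)

-- ===== PORT A =====
def convert (ch_i : String) (ch_j : String) (grammer : List (String × List String)) : List (String × List String) :=
  let g : PySem.Dict String (List String) := PySem.Dict.mk grammer
  let rules := g  -- rules = copy.deepcopy(grammer)
  ((g.keys).foldl (fun rules key =>
      (g.getD key []).foldl (fun rules item_i =>
        if ch_i == key && headMatch ch_j item_i then
          let rules := rules.modify key [] (fun v => (PySem.List.remove? v item_i).getD v)
          (g.getD ch_j []).foldl
            (fun rules item_j => rules.modify key [] (fun v => v ++ [replOne item_j item_i]))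
            rules
        else rules) rules) rules).items

-- ===== PORT B =====
def convert_alt (ch_i : String) (ch_j : String) (grammer : List (String × List String)) : List (String × List String) :=
  let g : PySem.Dict String (List String) := PySem.Dict.mk grammer
  let rules := g  -- rules = copy.deepcopy(grammer)
  (if g.contains ch_i then
    let ka := (rules.getD ch_i []).foldl
      (fun (ka : List String × List String) item_i =>
        if headMatch ch_j item_i then
          (ka.1, ka.2 ++ (g.getD ch_j []).map (fun item_j => replOne item_j item_i))
        else (ka.1 ++ [item_i], ka.2)) ([], [])
    rules.insert ch_i (ka.1 ++ ka.2)
  else rules).items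

-- ===== PRECONDITION & SPEC =====
-- Pre_ excludes (a) association lists with duplicate keys — a Python dict cannot carry them, so the
-- list encoding is ambiguous there — and (b) the inputs where A raises: an empty production under
-- ch_i (IndexError on item_i[0]) and a production under ch_i starting with ch_j while ch_j is not a
-- key of the grammar (KeyError on grammer[ch_j]).
def Pre_convert (ch_i : String) (ch_j : String) (grammer : List (String × List String)) : Prop :=
  (grammer.map Prod.fst).Nodup ∧
  ∀ p ∈ (PySem.Dict.mk grammer).getD ch_i [],
    p ≠ "" ∧ (headMatch ch_j p = true → (PySem.Dict.mk grammer).contains ch_j = true)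
instance (ch_i : String) (ch_j : String) (grammer : List (String × List String)) : Decidable (Pre_convert ch_i ch_j grammer) := by unfold Pre_convert; infer_instance

def pvWitness_convert : String × String × (List (String × List String)) :=
  ("S", "A", [("S", ["Ab", "bA"]), ("A", ["a", "b"])])

def Spec_convert (ch_i : String) (ch_j : String) (grammer : List (String × List String)) (out : List (String × List String)) : Prop := out = convert_alt ch_i ch_j grammer
instance (ch_i : String) (ch_j : String) (grammer : List (String × List String)) (out : List (String × List String)) : Decidable (Spec_convert ch_i ch_j grammer out) := by unfold Spec_convert; infer_instance

-- ===== CLAIM (what is proved, stated in full; the proofs are below) =====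
def Claim_equal_convert : Prop := ∀ (ch_i : String) (ch_j : String) (grammer : List (String × List String)), Dom_convert ch_i ch_j grammer → Pre_convert ch_i ch_j grammer → Spec_convert ch_i ch_j grammer (convert ch_i ch_j grammer)

-- ===== LEMMAS AND PROOFS =====

-- inserting twice at the same key keeps only the second value
theorem insert_insert_self {κ ν : Type} [BEq κ] [LawfulBEq κ] (d : PySem.Dict κ ν) (k : κ) (v w : ν) :
    (d.insert k v).insert k w = d.insert k w := by
  by_cases h : d.contains k = true
  · have hc : (d.insert k v).contains k = true := PySem.Dict.contains_insert_self d k v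
    simp only [PySem.Dict.insert, h, if_true] at hc ⊢
    rw [if_pos hc, List.map_map]
    congr 1
    apply List.map_congr_left
    intro p _
    by_cases hp : (p.1 == k) = true <;> simp [Function.comp, hp]
  · have hc : (d.insert k v).contains k = true := PySem.Dict.contains_insert_self d k v
    simp only [PySem.Dict.insert, h, if_false, Bool.false_eq_true] at hc ⊢
    rw [if_pos hc, List.map_append]
    have hmap : ∀ p ∈ d.items, (if (p.1 == k) = true then (k, w) else p) = p := by
      intro p hp
      have : (p.1 == k) = false := by
        by_contra hb
        exact h (List.any_eq_true.mpr ⟨p, hp, by simpa using hb⟩)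
      simp [this]
    simp [List.map_congr_left hmap]

-- re-inserting the value a nodup-keyed dict already holds changes nothing
theorem insert_get?_self {κ ν : Type} [BEq κ] [LawfulBEq κ] (d : PySem.Dict κ ν) (k : κ) (v : ν)
    (hn : d.keys.Nodup) (h : d.get? k = some v) : d.insert k v = d := by
  have hc : d.contains k = true := by
    rw [PySem.Dict.contains_eq_isSome_get?, h]; rfl
  simp only [PySem.Dict.insert, hc, if_true]
  have hmap : ∀ p ∈ d.items, (if (p.1 == k) = true then (k, v) else p) = p := by
    intro p hp
    by_cases hb : (p.1 == k) = true
    · obtain ⟨a, b⟩ := p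
      have hk : a = k := by simpa using hb
      have h2 : d.get? a = some b := PySem.Dict.get?_of_mem_items d hp hn
      rw [hk, h] at h2
      simp_all
    · simp [hb]
  have := List.map_congr_left hmap
  simp [this]

-- list.remove takes the first occurrence: with none in 'kept', it removes the head of the middle segment
theorem remove?_append_not_mem {α : Type} [BEq α] [LawfulBEq α]
    (kept : List α) (t : α) (l : List α) (h : t ∉ kept) :
    PySem.List.remove? (kept ++ t :: l) t = some (kept ++ l) := by
  induction kept with
  | nil => simp
  | cons x xs ih =>
    have hx : x ≠ t := by intro he; exact h (by simp [he])
    have hxs : t ∉ xs := fun hm => h (by simp [hm])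
    rw [List.cons_append, PySem.List.remove?_cons_of_ne _ hx, ih hxs]
    rfl

-- A's append-one-at-a-time loop collapses to one insert of the extended value
theorem foldl_modify_append {κ ν σ : Type} [BEq κ] [LawfulBEq κ] (h : σ → ν) :
    ∀ (L : List σ) (d : PySem.Dict κ (List ν)) (k : κ) (v0 : List ν),
    d.keys.Nodup → d.get? k = some v0 →
    L.foldl (fun d x => d.modify k [] (fun v => v ++ [h x])) d
      = d.insert k (v0 ++ L.map h) := by
  intro L
  induction L with
  | nil =>
    intro d k v0 hn hv
    simpa using (insert_get?_self d k v0 hn hv).symm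
  | cons x xs ih =>
    intro d k v0 hn hv
    have hstep : d.modify k [] (fun v => v ++ [h x]) = d.insert k (v0 ++ [h x]) := by
      simp [PySem.Dict.modify, PySem.Dict.getD_eq_get?_getD, hv]
    rw [List.foldl_cons, hstep,
      ih _ k (v0 ++ [h x]) (PySem.Dict.nodup_keys_insert d k (v0 ++ [h x]) hn)
        (PySem.Dict.get?_insert_self d k (v0 ++ [h x])),
      insert_insert_self]
    simp

-- B's kept/appended fold, characterised by filter and flatMap
theorem foldB_spec (m : String → Bool) (rep : String → List String) :
    ∀ (todo : List String) (k a : List String),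
      todo.foldl (fun (ka : List String × List String) item =>
        if m item then (ka.1, ka.2 ++ rep item) else (ka.1 ++ [item], ka.2)) (k, a)
      = (k ++ todo.filter (fun t => !m t), a ++ (todo.filter m).flatMap rep) := by
  intro todo
  induction todo with
  | nil => intro k a; simp
  | cons t ts ih =>
    intro k a
    by_cases hm : m t = true <;> simp [hm, ih]

-- A's inner loop over the ch_i entry, as one insert (the loop invariant:
-- value = kept-so-far ++ unprocessed ++ appended-so-far)
theorem innerA_spec (ch_i ch_j : String) (J : List String) :
    ∀ (todo kept acc : List String) (d : PySem.Dict String (List String)),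
      (∀ t ∈ kept, headMatch ch_j t = false) → d.keys.Nodup →
      d.get? ch_i = some (kept ++ todo ++ acc) →
      todo.foldl (fun rules item_i =>
          if headMatch ch_j item_i then
            J.foldl (fun rules item_j => rules.modify ch_i [] (fun v => v ++ [replOne item_j item_i]))
              (rules.modify ch_i [] (fun v => (PySem.List.remove? v item_i).getD v))
          else rules) d
        = d.insert ch_i (kept ++ todo.filter (fun t => !headMatch ch_j t)
            ++ (acc ++ (todo.filter (headMatch ch_j)).flatMap (fun t => J.map (fun j => replOne j t)))) := by
  intro todo
  induction todo with
  | nil =>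
    intro kept acc d hk hn hd
    simpa using (insert_get?_self d ch_i _ hn (by simpa using hd)).symm
  | cons t ts ih =>
    intro kept acc d hk hn hd
    by_cases hm : headMatch ch_j t = true
    · have htk : t ∉ kept := fun hmem => by simp [hk t hmem] at hm
      have hrem : PySem.List.remove? (kept ++ t :: (ts ++ acc)) t = some (kept ++ (ts ++ acc)) :=
        remove?_append_not_mem kept t (ts ++ acc) htk
      have hd' : d.get? ch_i = some (kept ++ t :: (ts ++ acc)) := by simpa using hd
      have hstep1 : d.modify ch_i [] (fun v => (PySem.List.remove? v t).getD v)
          = d.insert ch_i (kept ++ (ts ++ acc)) := by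
        simp [PySem.Dict.modify, PySem.Dict.getD_eq_get?_getD, hd', hrem]
      have hstep2 : J.foldl (fun rules item_j => rules.modify ch_i [] (fun v => v ++ [replOne item_j t]))
            (d.insert ch_i (kept ++ (ts ++ acc)))
          = d.insert ch_i (kept ++ ts ++ (acc ++ J.map (fun j => replOne j t))) := by
        rw [foldl_modify_append (fun j => replOne j t) J _ ch_i (kept ++ (ts ++ acc))
            (PySem.Dict.nodup_keys_insert _ _ _ hn) (PySem.Dict.get?_insert_self _ _ _),
          insert_insert_self]
        simp
      rw [List.foldl_cons, if_pos hm, hstep1, hstep2,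
        ih kept (acc ++ J.map (fun j => replOne j t)) _ hk
          (PySem.Dict.nodup_keys_insert _ _ _ hn)
          (by rw [PySem.Dict.get?_insert_self]),
        insert_insert_self]
      simp only [List.filter_cons, hm, Bool.not_true, if_false, if_true, List.flatMap_cons,
        List.append_assoc, Bool.false_eq_true]
    · have hm' : headMatch ch_j t = false := by simpa using hm
      rw [List.foldl_cons, if_neg (by simp [hm']),
        ih (kept ++ [t]) acc d
          (by intro x hx; rcases List.mem_append.mp hx with h1 | h1
              · exact hk x h1
              · simp at h1; simpa [h1] using hm')
          hn (by simpa using hd)]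
      simp [hm']

-- keys other than ch_i never change rules
theorem outer_skip_many (ch_i ch_j : String) (g : PySem.Dict String (List String)) :
    ∀ (ks : List String) (d : PySem.Dict String (List String)),
      (∀ k ∈ ks, k ≠ ch_i) →
      ks.foldl (fun rules key =>
        (g.getD key []).foldl (fun rules item_i =>
          if ch_i == key && headMatch ch_j item_i then
            (g.getD ch_j []).foldl
              (fun rules item_j => rules.modify key [] (fun v => v ++ [replOne item_j item_i]))
              (rules.modify key [] (fun v => (PySem.List.remove? v item_i).getD v))
          else rules) rules) d = d := by
  intro ks
  induction ks with
  | nil => intro d _; rfl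
  | cons k ks ih =>
    intro d hks
    have hne : (ch_i == k) = false :=
      beq_eq_false_iff_ne.mpr (fun he => (hks k (by simp)) he.symm)
    rw [List.foldl_cons]
    have hinner : (g.getD k []).foldl (fun rules item_i =>
        if ch_i == k && headMatch ch_j item_i then
          (g.getD ch_j []).foldl
            (fun rules item_j => rules.modify k [] (fun v => v ++ [replOne item_j item_i]))
            (rules.modify k [] (fun v => (PySem.List.remove? v item_i).getD v))
        else rules) d = d := by
      generalize (g.getD k []) = items
      induction items with
      | nil => rfl
      | cons x xs ih2 =>
        simp only [List.foldl_cons, hne, Bool.false_and, Bool.false_eq_true, if_false] at ih2 ⊢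
        exact ih2
    rw [hinner]
    exact ih d (fun x hx => hks x (by simp [hx]))

-- ===== VERDICT (by name: the statement is the Claim_ definition above) =====
theorem convert_spec : Claim_equal_convert := by
  intro ch_i ch_j grammer _hdom hpre
  obtain ⟨hn, _hsafe⟩ := hpre
  simp only [Spec_convert, convert, convert_alt]
  set g : PySem.Dict String (List String) := PySem.Dict.mk grammer with hg
  have hkn : g.keys.Nodup := by simpa [hg, PySem.Dict.keys] using hn
  by_cases hc : g.contains ch_i = true
  · -- ch_i is a key: A touches exactly the ch_i entry, once
    have hmem : ch_i ∈ g.keys := (PySem.Dict.contains_iff_mem_keys g ch_i).mp hc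
    obtain ⟨l1, l2, hsplit⟩ := List.append_of_mem hmem
    have hkn' : (l1 ++ ch_i :: l2).Nodup := hsplit ▸ hkn
    rw [List.nodup_append] at hkn'
    obtain ⟨_, hnl2, hdisj⟩ := hkn'
    have h1 : ∀ k ∈ l1, k ≠ ch_i := fun k hk => hdisj k hk ch_i (by simp)
    have h2 : ∀ k ∈ l2, k ≠ ch_i := fun k hk he => by
      rw [List.nodup_cons] at hnl2
      exact hnl2.1 (he ▸ hk)
    obtain ⟨v0, hv0⟩ : ∃ v, g.get? ch_i = some v := by
      have := PySem.Dict.contains_eq_isSome_get? g ch_i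
      rw [hc] at this
      exact Option.isSome_iff_exists.mp this.symm
    have hgetD : g.getD ch_i [] = v0 := by
      rw [PySem.Dict.getD_eq_get?_getD, hv0]; rfl
    rw [hsplit, List.foldl_append, outer_skip_many ch_i ch_j g l1 g h1, List.foldl_cons]
    have hself : ∀ (item_i : String),
        (ch_i == ch_i && headMatch ch_j item_i) = headMatch ch_j item_i := by
      intro item_i; simp
    simp only [hself, hc, if_true]
    conv_lhs =>
      rw [show (g.getD ch_i []).foldl (fun rules item_i =>
            if headMatch ch_j item_i then
              (g.getD ch_j []).foldl
                (fun rules item_j => rules.modify ch_i [] (fun v => v ++ [replOne item_j item_i]))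
                (rules.modify ch_i [] (fun v => (PySem.List.remove? v item_i).getD v))
            else rules) g
          = g.insert ch_i ([] ++ v0.filter (fun t => !headMatch ch_j t)
              ++ ([] ++ (v0.filter (headMatch ch_j)).flatMap
                   (fun t => (g.getD ch_j []).map (fun j => replOne j t)))) from by
        rw [hgetD]
        exact innerA_spec ch_i ch_j (g.getD ch_j []) v0 [] [] g (by simp) hkn (by simpa using hv0)]
    rw [outer_skip_many ch_i ch_j g l2 _ h2, hgetD,
      foldB_spec (headMatch ch_j) _ v0 [] []]
  · -- ch_i is not a key: both sides return the grammar unchanged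
    have hnm : ch_i ∉ g.keys := fun hm => hc ((PySem.Dict.contains_iff_mem_keys g ch_i).mpr hm)
    rw [outer_skip_many ch_i ch_j g g.keys g (fun k hk he => hnm (he ▸ hk))]
    simp [hc]
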